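-- pv_equiv track=rewrite | github.com/yibeichan/face-track | scripts/06_cluster_face_match.py | reorganize_by_cluster
-- ===== SOURCE A (Python) =====
-- def reorganize_by_cluster(clustered_faces):
--     clusters = {}
--     for scene_id, faces in clustered_faces.items():
--         for face_data in faces:
--             cluster_id = face_data['cluster_id']
--             if cluster_id not in clusters:
--                 clusters[cluster_id] = []
--             clusters[cluster_id].append(face_data)
--     return clusters
-- ===== SOURCE B (Python) =====
-- def reorganize_by_cluster(clustered_faces):
--     flat = [f for faces in clustered_faces.values() for f in faces]
--     order = list(dict.fromkeys(f['cluster_id'] for f in flat))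
--     return {cid: [f for f in flat if f['cluster_id'] == cid] for cid in order}
-- ===== Notes on version B (the rewrite author's own statement) =====
-- stated objective: alternative
-- what changed: B flattens all faces into one list, computes the first-occurrence order of cluster ids with dict.fromkeys, and builds each cluster by filtering the flat list per id, instead of A's incremental dict accumulation with a per-face membership test and append.
import Mathlib
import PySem

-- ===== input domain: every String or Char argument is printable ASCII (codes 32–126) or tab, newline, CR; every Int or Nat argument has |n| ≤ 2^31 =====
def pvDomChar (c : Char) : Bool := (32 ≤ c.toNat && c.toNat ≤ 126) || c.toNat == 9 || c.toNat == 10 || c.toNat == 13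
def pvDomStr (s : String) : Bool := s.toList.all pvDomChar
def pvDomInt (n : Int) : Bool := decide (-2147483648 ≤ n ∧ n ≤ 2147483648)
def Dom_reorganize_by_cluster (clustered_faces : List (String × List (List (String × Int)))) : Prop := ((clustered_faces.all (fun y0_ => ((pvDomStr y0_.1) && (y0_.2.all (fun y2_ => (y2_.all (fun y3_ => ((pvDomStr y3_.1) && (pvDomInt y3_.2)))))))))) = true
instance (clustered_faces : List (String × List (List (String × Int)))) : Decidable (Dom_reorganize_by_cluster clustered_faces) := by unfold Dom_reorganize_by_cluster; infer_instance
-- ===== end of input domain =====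

-- B groups faces by flattening once, deduplicating cluster ids in first-occurrence order and
-- filtering the flat list per id (alternative decomposition), instead of A's incremental dict accumulation.


-- face_data['cluster_id'] as both Pythons perform it: first-match lookup in the face's dict
-- (the default 0 is never reached inside Pre_, which requires the key to be present).
def pvCid (face : List (String × Int)) : Int := (PySem.Dict.mk face).getD "cluster_id" 0

-- ===== PORT A =====
def reorganize_by_cluster (clustered_faces : List (String × List (List (String × Int)))) : List (Int × List (List (String × Int))) :=
  (clustered_faces.foldl
    (fun clusters scene =>
      scene.2.foldl
        (fun clusters face_data =>
          let cluster_id := pvCid face_data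
          let clusters :=
            if clusters.contains cluster_id then clusters
            else clusters.insert cluster_id ([] : List (List (String × Int)))
          clusters.modify cluster_id [] (fun l => l ++ [face_data]))
        clusters)
    (PySem.Dict.empty : PySem.Dict Int (List (List (String × Int))))).items

-- ===== PORT B =====
def reorganize_by_cluster_alt (clustered_faces : List (String × List (List (String × Int)))) : List (Int × List (List (String × Int))) :=
  let flat := clustered_faces.flatMap (fun p => p.2)
  (PySem.List.dedup (flat.map pvCid)).map (fun cid => (cid, flat.filter (fun f => pvCid f == cid)))

-- ===== PRECONDITION & SPEC =====
-- Pre_ excludes exactly the inputs where A raises KeyError: a face dict without the key 'cluster_id'.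
def Pre_reorganize_by_cluster (clustered_faces : List (String × List (List (String × Int)))) : Prop :=
  ∀ p ∈ clustered_faces, ∀ face ∈ p.2, "cluster_id" ∈ face.map (fun kv => kv.1)
instance (clustered_faces : List (String × List (List (String × Int)))) : Decidable (Pre_reorganize_by_cluster clustered_faces) := by unfold Pre_reorganize_by_cluster; infer_instance
def pvWitness_reorganize_by_cluster : (List (String × List (List (String × Int)))) :=
  [("scene_1", [[("cluster_id", 1), ("frame", 3)], [("cluster_id", 2)]]), ("scene_2", [[("cluster_id", 1)]])]

def Spec_reorganize_by_cluster (clustered_faces : List (String × List (List (String × Int)))) (out : List (Int × List (List (String × Int)))) : Prop := out = reorganize_by_cluster_alt clustered_faces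
instance (clustered_faces : List (String × List (List (String × Int)))) (out : List (Int × List (List (String × Int)))) : Decidable (Spec_reorganize_by_cluster clustered_faces out) := by unfold Spec_reorganize_by_cluster; infer_instance

-- ===== CLAIM (what is proved, stated in full; the proofs are below) =====
def Claim_equal_reorganize_by_cluster : Prop := ∀ (clustered_faces : List (String × List (List (String × Int)))), Dom_reorganize_by_cluster clustered_faces → Pre_reorganize_by_cluster clustered_faces → Spec_reorganize_by_cluster clustered_faces (reorganize_by_cluster clustered_faces)

-- ===== LEMMAS AND PROOFS =====

-- A's loop body is one dict 'modify' (insert-if-absent then append = append-to-default).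
lemma pvStep_eq (d : PySem.Dict Int (List (List (String × Int)))) (f : List (String × Int)) :
    (if d.contains (pvCid f) then d else d.insert (pvCid f) ([] : List (List (String × Int)))).modify
        (pvCid f) [] (fun l => l ++ [f])
      = d.modify (pvCid f) [] (fun l => l ++ [f]) := by
  by_cases h : d.contains (pvCid f) = true
  · simp [h]
  · simp only [Bool.not_eq_true] at h
    simp only [h, if_neg, Bool.false_eq_true, not_false_iff]
    apply PySem.Dict.ext
    simp only [PySem.Dict.modify, PySem.Dict.getD_insert_self, PySem.Dict.getD_of_not_contains d _ h]
    rw [PySem.Dict.items_insert_of_contains _ _ (PySem.Dict.contains_insert_self _ _ _),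
        PySem.Dict.items_insert_of_not_contains _ _ h,
        PySem.Dict.items_insert_of_not_contains _ _ h]
    rw [List.map_append]
    congr 1
    · conv_rhs => rw [← List.map_id d.items]
      apply List.map_congr_left
      intro p hp
      have hk : p.1 ∈ d.keys := PySem.Dict.mem_keys_of_mem_items d hp
      have : p.1 ≠ pvCid f := by
        intro he
        rw [he, ← PySem.Dict.contains_iff_mem_keys d (pvCid f), h] at hk
        exact Bool.false_ne_true hk
      simp [this]
    · simp

-- A dict with nodup keys is exactly its key list paired with its lookups.
lemma items_eq_keys_map (d : PySem.Dict Int (List (List (String × Int)))) (h : d.keys.Nodup) :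
    d.items = d.keys.map (fun k => (k, d.getD k [])) := by
  have hk : d.keys = d.items.map (fun p => p.1) := rfl
  rw [hk, List.map_map]
  conv_lhs => rw [← List.map_id d.items]
  apply List.map_congr_left
  intro p hp
  have := PySem.Dict.getD_of_mem_items d (k := p.1) (v := p.2) (by simpa using hp) h ([])
  simp [this]

-- the lookup of the grouping fold is the per-id filter of the processed list
lemma getD_fold (l : List (List (String × Int))) (c : Int) :
    ((l.foldl (fun d f => d.modify (pvCid f) [] (fun v => v ++ [f]))
        (PySem.Dict.empty : PySem.Dict Int (List (List (String × Int))))).getD c [])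
      = l.filter (fun f => pvCid f == c) := by
  have h := PySem.Dict.getD_foldl_modify_append (l.map (fun f => ((pvCid f : Int), f)))
      (PySem.Dict.empty : PySem.Dict Int (List (List (String × Int)))) c
  rw [List.foldl_map] at h
  simp only at h
  rw [h, PySem.Dict.getD_empty, List.filter_map, List.map_map]
  have e1 : ((fun x : Int × List (String × Int) => x.2) ∘ fun f : List (String × Int) => ((pvCid f : Int), f)) = fun f => f := rfl
  have e2 : ((fun p : Int × List (String × Int) => p.1 == c) ∘ fun f : List (String × Int) => ((pvCid f : Int), f)) = fun f => pvCid f == c := rfl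
  rw [e1, e2]
  simp

-- the keys of the grouping fold are the distinct cluster ids in first-occurrence order
lemma keys_fold (l : List (List (String × Int))) :
    ((l.foldl (fun d f => d.modify (pvCid f) [] (fun v => v ++ [f]))
        (PySem.Dict.empty : PySem.Dict Int (List (List (String × Int))))).keys)
      = PySem.List.dedup (l.map pvCid) := by
  have h := PySem.Dict.keys_foldl_modify_key l pvCid ([] : List (List (String × Int)))
      (fun _ f => fun v => v ++ [f])
      (PySem.Dict.empty : PySem.Dict Int (List (List (String × Int))))
  simp only at h
  rw [h, PySem.Dict.keys_empty, PySem.List.dedup_eq_ofList]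
  rfl

-- ===== VERDICT (by name: the statement is the Claim_ definition above) =====
theorem reorganize_by_cluster_spec : Claim_equal_reorganize_by_cluster := by
  intro clustered_faces _ _
  unfold Spec_reorganize_by_cluster reorganize_by_cluster reorganize_by_cluster_alt
  rw [← List.foldl_flatMap]
  have hbody : (fun (clusters : PySem.Dict Int (List (List (String × Int)))) face_data =>
      let cluster_id := pvCid face_data
      let clusters :=
        if clusters.contains cluster_id then clusters
        else clusters.insert cluster_id ([] : List (List (String × Int)))
      clusters.modify cluster_id [] (fun l => l ++ [face_data]))
      = (fun d f => d.modify (pvCid f) [] (fun v => v ++ [f])) := by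
    funext d f
    exact pvStep_eq d f
  rw [hbody]
  set flat := clustered_faces.flatMap (fun p => p.2) with hflat
  have hnd : ((flat.foldl (fun d f => d.modify (pvCid f) [] (fun v => v ++ [f]))
      (PySem.Dict.empty : PySem.Dict Int (List (List (String × Int))))).keys).Nodup := by
    apply PySem.Dict.nodup_keys_foldl_modify_key
    rw [PySem.Dict.keys_empty]; exact List.nodup_nil
  rw [items_eq_keys_map _ hnd, keys_fold]
  apply List.map_congr_left
  intro c _
  rw [getD_fold]
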